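-- pv_equiv track=rewrite | github.com/va64doman/codility | L10-Prime-and-composite-numbers/peaks.py | peaks
-- ===== SOURCE A (Python) =====
-- def peaks(A):
--     # build list of peaks
--     list_len = len(A)
--     peaks = [i for i in range(1, list_len - 1) if A[i - 1] < A[i] > A[i + 1]]
--     # iterate through possible block counts
--     for i in range(len(peaks), 0, -1):
--         # only consider divisors of list_len
--         if list_len % i == 0:
--             # initialize set of blocks with no peaks
--             blocks_without_peaks = set(range(i))
--             # drop blocks with peaks, one by one
--             for peak in peaks:
--                 block = peak * i // list_len
--                 blocks_without_peaks.discard(block)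
--             # found the max number of blocks
--             if not blocks_without_peaks:
--                 return i
--     return 0
--     pass
-- ===== SOURCE B (Python) =====
-- def peaks(A):
--     n = len(A)
--     # peaks found by sliding a window of three over A
--     pk = [j + 1 for j, (x, y, z) in enumerate(zip(A, A[1:], A[2:])) if x < y > z]
--     # candidate block counts, largest first; a count i (block size s = n//i) works
--     # iff the first peak lies in block 0, the last in block i-1, and no two
--     # consecutive peaks skip a whole block
--     for i in range(len(pk), 0, -1):
--         if n % i == 0:
--             s = n // i
--             if pk[0] < s and pk[-1] >= n - s and all(q // s - p // s <= 1 for p, q in zip(pk, pk[1:])):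
--                 return i
--     return 0
-- ===== Notes on version B (the rewrite author's own statement) =====
-- stated objective: alternative
-- what changed: B finds peaks by sliding a zip window of three and tests each candidate block count with a boundary-plus-consecutive-peak-gap condition (first peak in block 0, last in the final block, no adjacent pair of peaks skipping a whole block), instead of A's per-candidate set of uncovered blocks shrunk by discarding each peak's block.
import Mathlib
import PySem

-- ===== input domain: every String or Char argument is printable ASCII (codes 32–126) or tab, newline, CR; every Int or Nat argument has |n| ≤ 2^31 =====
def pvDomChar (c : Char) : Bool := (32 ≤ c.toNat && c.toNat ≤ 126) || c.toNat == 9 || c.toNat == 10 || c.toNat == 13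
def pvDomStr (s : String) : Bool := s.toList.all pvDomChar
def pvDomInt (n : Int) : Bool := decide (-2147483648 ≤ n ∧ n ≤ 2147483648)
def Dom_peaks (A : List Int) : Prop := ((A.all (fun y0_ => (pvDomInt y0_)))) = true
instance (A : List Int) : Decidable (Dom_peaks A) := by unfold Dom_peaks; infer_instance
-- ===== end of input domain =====

-- B detects peaks by sliding a window of three (zip) and tests each candidate block count by a
-- boundary + consecutive-peak gap condition instead of A's per-candidate uncovered-block set
-- (objective: alternative).

-- ===== PORT A =====
-- the peak comparison A[i-1] < A[i] > A[i+1]; indices are always in range where it is used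
def peaksCmpA (A : List Int) (i : Int) : Bool :=
  match PySem.List.pyGet? A (i - 1), PySem.List.pyGet? A i, PySem.List.pyGet? A (i + 1) with
  | some x, some y, some z => decide (x < y) && decide (z < y)
  | _, _, _ => false

-- peaks = [i for i in range(1, list_len - 1) if A[i-1] < A[i] > A[i+1]]
def peaksListA (A : List Int) : List Int :=
  (PySem.List.pyRange 1 ((A.length : Int) - 1) 1).filter (peaksCmpA A)

-- the 'for i in range(len(peaks), 0, -1)' loop with its early return
def peaksLoopA (listLen : Int) (pks : List Int) : List Int → Int
  | [] => 0
  | i :: rest =>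
    if PySem.Int.mod listLen i = 0 then
      let blocks : PySem.Set Int :=
        pks.foldl (fun s p => PySem.Set.discard s (PySem.Int.floordiv (p * i) listLen))
          (PySem.Set.ofList (PySem.List.pyRange 0 i 1))
      if blocks.isEmpty then i else peaksLoopA listLen pks rest
    else peaksLoopA listLen pks rest

def peaks (A : List Int) : Int :=
  peaksLoopA (A.length : Int) (peaksListA A)
    (PySem.List.pyRange ((peaksListA A).length : Int) 0 (-1))

-- ===== PORT B =====
-- pk = [j + 1 for j, (x, y, z) in enumerate(zip(A, A[1:], A[2:])) if x < y > z]
def peaksListB (A : List Int) : List Int :=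
  (PySem.List.enumerate (A.zip ((A.drop 1).zip (A.drop 2)))).filterMap
    (fun e => if e.2.1 < e.2.2.1 ∧ e.2.2.2 < e.2.2.1 then some (e.1 + 1) else none)

-- pk[0] < s and pk[-1] >= n - s and all(q//s - p//s <= 1 for p, q in zip(pk, pk[1:]))
-- (pk is never empty where this is evaluated, so pk[0] / pk[-1] are in range)
def gapOkB (n s : Int) (pk : List Int) : Bool :=
  decide (PySem.List.pyGetD pk 0 0 < s) &&
  decide (n - s ≤ PySem.List.pyGetD pk (-1) 0) &&
  (pk.zip (pk.drop 1)).all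
    (fun pq => decide (PySem.Int.floordiv pq.2 s - PySem.Int.floordiv pq.1 s ≤ 1))

-- the 'for i in range(len(pk), 0, -1)' loop with its early return
def peaksLoopB (n : Int) (pk : List Int) : List Int → Int
  | [] => 0
  | i :: rest =>
    if PySem.Int.mod n i = 0 then
      if gapOkB n (PySem.Int.floordiv n i) pk then i else peaksLoopB n pk rest
    else peaksLoopB n pk rest

def peaks_alt (A : List Int) : Int :=
  peaksLoopB (A.length : Int) (peaksListB A)
    (PySem.List.pyRange ((peaksListB A).length : Int) 0 (-1))

-- ===== PRECONDITION & SPEC =====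
def Spec_peaks (A : List Int) (out : Int) : Prop := out = peaks_alt A
instance (A : List Int) (out : Int) : Decidable (Spec_peaks A out) := by unfold Spec_peaks; infer_instance

-- ===== CLAIM (what is proved, stated in full; the proofs are below) =====
def Claim_equal_peaks : Prop := ∀ (A : List Int), Dom_peaks A → Spec_peaks A (peaks A)

-- ===== LEMMAS AND PROOFS =====

-- a filterMap whose function is an if-then-some is a filter-then-map
theorem filterMap_eq_filter_map (l : List Nat) (g : Nat → Option Int) (q : Nat → Bool)
    (f : Nat → Int) (h : ∀ k ∈ l, g k = if q k = true then some (f k) else none) :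
    l.filterMap g = (l.filter q).map f := by
  induction l with
  | nil => simp
  | cons a t ih =>
    have ha := h a (List.mem_cons_self ..)
    have ht := ih (fun k hk => h k (List.mem_cons_of_mem _ hk))
    by_cases hq : q a = true <;>
      simp [ha, hq, ht]

-- the two peak lists coincide
theorem listB_eq (A : List Int) : peaksListB A = peaksListA A := by
  unfold peaksListB peaksListA
  have hzlen : (A.zip ((A.drop 1).zip (A.drop 2))).length = (((A.length : Int)) - 1 - 1).toNat := by
    simp [List.length_zip, List.length_drop]
    omega
  rw [PySem.List.enumerate_eq_map_pyRange _ (0, (0, 0)), List.filterMap_map,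
    show PySem.List.len (A.zip ((A.drop 1).zip (A.drop 2)))
      = (((A.zip ((A.drop 1).zip (A.drop 2))).length : Nat) : Int) from by simp,
    PySem.List.pyRange_zero_nat, List.filterMap_map,
    PySem.List.pyRange_one, List.filter_map, ← hzlen]
  refine filterMap_eq_filter_map _ _ _ _ ?_
  intro k hk
  rw [List.mem_range] at hk
  have hk2 : k + 2 < A.length := by omega
  simp only [Function.comp_apply]
  have e2 : (1 : Int) + (k : Int) = ((k + 1 : Nat) : Int) := by push_cast; ring
  have e1 : ((k + 1 : Nat) : Int) - 1 = ((k : Nat) : Int) := by push_cast; ring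
  have e3 : ((k + 1 : Nat) : Int) + 1 = ((k + 2 : Nat) : Int) := by push_cast; ring
  rw [PySem.List.pyGetD_eq_getElem _ _ (Int.natCast_nonneg k) (by exact_mod_cast hk)]
  simp only [Int.toNat_natCast, List.getElem_zip, List.getElem_drop]
  simp only [peaksCmpA]
  simp only [e2, e1, e3, PySem.List.pyGet?_natCast,
    List.getElem?_eq_getElem (show k < A.length by omega),
    List.getElem?_eq_getElem (show k + 1 < A.length by omega),
    List.getElem?_eq_getElem (show k + 2 < A.length by omega)]
  simp only [show 1 + k = k + 1 from Nat.add_comm 1 k, show 2 + k = k + 2 from Nat.add_comm 2 k]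
  by_cases hcond : A[k]'(by omega) < A[k + 1]'(by omega) ∧ A[k + 2]'(by omega) < A[k + 1]'(by omega)
  · simp [hcond]
  · simp only [if_neg hcond]
    rw [if_neg]
    intro hdec
    rw [Bool.and_eq_true, decide_eq_true_eq, decide_eq_true_eq] at hdec
    exact hcond hdec

theorem mem_peaksListA {A : List Int} {p : Int} (h : p ∈ peaksListA A) :
    1 ≤ p ∧ p < (A.length : Int) - 1 := by
  have hm := List.mem_of_mem_filter h
  rw [PySem.List.mem_pyRange_one] at hm
  exact hm

theorem sorted_peaksListA (A : List Int) : (peaksListA A).Pairwise (· < ·) :=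
  (PySem.List.pairwise_lt_pyRange_one _ _).filter _

theorem mem_foldl_discard (P : List Int) (f : Int → Int) (s : PySem.Set Int) (y : Int) :
    y ∈ P.foldl (fun s p => PySem.Set.discard s (f p)) s ↔ y ∈ s ∧ ∀ p ∈ P, f p ≠ y := by
  induction P generalizing s with
  | nil => simp
  | cons a t ih =>
    simp only [List.foldl_cons, ih, PySem.Set.mem_discard, List.mem_cons]
    aesop

-- a member of zip l (l.drop 1) is an adjacent pair: it splits the list around itself
theorem zip_mem_decomp :
    ∀ (l : List Int), ∀ pq ∈ l.zip (l.drop 1), ∃ l1 l2, l = l1 ++ pq.1 :: pq.2 :: l2 := by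
  intro l
  induction l with
  | nil => intro pq hpq; simp at hpq
  | cons a t ih =>
    intro pq hpq
    match t, ih, hpq with
    | [], _, hpq => simp at hpq
    | b :: t', ih, hpq =>
      rcases List.mem_cons.mp hpq with rfl | hpq'
      · exact ⟨[], t', rfl⟩
      · obtain ⟨l1, l2, heq⟩ := ih pq hpq'
        exact ⟨a :: l1, l2, by rw [List.cons_append, ← heq]⟩

-- discrete intermediate-value lemma along a list whose g-steps increase by at most 1
theorem zip_all_ivt (g : Int → Int) :
    ∀ (t : List Int) (h b : Int),
      (((h :: t).zip t).all (fun pq => decide (g pq.2 - g pq.1 ≤ 1)) = true) →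
      g h ≤ b → b ≤ g ((h :: t).getLast (by simp)) →
      ∃ p ∈ h :: t, g p = b := by
  intro t
  induction t with
  | nil =>
    intro h b _ h1 h2
    exact ⟨h, List.mem_cons_self .., by simp at h2 ⊢; omega⟩
  | cons y t' ih =>
    intro h b hall h1 h2
    have hall2 := List.all_eq_true.mp hall
    have hstep : g y - g h ≤ 1 := by
      have := hall2 (h, y) (by rw [List.zip_cons_cons]; exact List.mem_cons_self ..)
      simpa using this
    have hall' : (((y :: t').zip t').all (fun pq => decide (g pq.2 - g pq.1 ≤ 1)) = true) :=
      List.all_eq_true.mpr (fun pq hpq =>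
        hall2 pq (by rw [List.zip_cons_cons]; exact List.mem_cons_of_mem _ hpq))
    by_cases hb : b ≤ g h
    · exact ⟨h, List.mem_cons_self .., by omega⟩
    · have h2' : b ≤ g ((y :: t').getLast (by simp)) := by
        rw [List.getLast_cons (by simp)] at h2
        exact h2
      obtain ⟨p, hp, hgp⟩ := ih y b hall' (by omega) h2'
      exact ⟨p, List.mem_cons_of_mem _ hp, hgp⟩

-- per-candidate: A's empty-uncovered-set test equals B's boundary+gap test
theorem cond_eq (n i : Int) (pk : List Int) (hi : 0 < i) (hdvd : i ∣ n) (hn : 0 < n)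
    (hne : pk ≠ []) (hsort : pk.Pairwise (· < ·)) (hb : ∀ p ∈ pk, 0 ≤ p ∧ p < n) :
    (pk.foldl (fun s p => PySem.Set.discard s (PySem.Int.floordiv (p * i) n))
        (PySem.Set.ofList (PySem.List.pyRange 0 i 1))).isEmpty
      = gapOkB n (PySem.Int.floordiv n i) pk := by
  set s := PySem.Int.floordiv n i with hsdef
  have hns : n = i * s := by
    rw [hsdef, PySem.Int.floordiv_eq_ediv_of_pos hi]
    exact (Int.mul_ediv_cancel' hdvd).symm
  have hs : 0 < s := by nlinarith
  have hbridge : ∀ p : Int, PySem.Int.floordiv (p * i) n = PySem.Int.floordiv p s := by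
    intro p
    rw [hns, PySem.Int.floordiv_eq_ediv_of_pos (by nlinarith : (0:Int) < i * s),
      PySem.Int.floordiv_eq_ediv_of_pos hs, mul_comm p i, Int.mul_ediv_mul_of_pos _ _ hi]
  obtain ⟨h, t, rfl⟩ := List.exists_cons_of_ne_nil hne
  have hgbd : ∀ p ∈ h :: t, 0 ≤ PySem.Int.floordiv p s ∧ PySem.Int.floordiv p s < i := by
    intro p hp
    obtain ⟨h0, h1⟩ := hb p hp
    refine ⟨(PySem.Int.le_floordiv_iff_mul_le hs).mpr (by nlinarith),
      (PySem.Int.floordiv_lt_iff_lt_mul hs).mpr (by nlinarith)⟩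
  have hmono : ∀ p q : Int, p ≤ q → PySem.Int.floordiv p s ≤ PySem.Int.floordiv q s := by
    intro p q hpq
    rw [PySem.Int.floordiv_eq_ediv_of_pos hs, PySem.Int.floordiv_eq_ediv_of_pos hs]
    exact Int.ediv_le_ediv hs hpq
  have hhead_le : ∀ p ∈ h :: t, h ≤ p := by
    intro p hp
    rcases List.mem_cons.mp hp with rfl | hp'
    · exact le_refl p
    · exact le_of_lt ((List.pairwise_cons.mp hsort).1 p hp')
  have hnecons : (h :: t) ≠ [] := by simp
  have hle_last : ∀ p ∈ h :: t, p ≤ (h :: t).getLast hnecons := by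
    intro p hp
    have hdec := List.dropLast_append_getLast hnecons
    rw [← hdec] at hp
    rcases List.mem_append.mp hp with hp1 | hp2
    · have hsort' := hsort
      rw [← hdec] at hsort'
      exact le_of_lt ((List.pairwise_append.mp hsort').2.2 p hp1 _ (by simp))
    · simp at hp2
      exact le_of_eq hp2
  have hlastmem : (h :: t).getLast hnecons ∈ h :: t := List.getLast_mem hnecons
  have hlastbd := hb _ hlastmem
  have hheadbd := hb h (List.mem_cons_self ..)
  -- A's test ↔ every block index 0 ≤ b < i is hit by some peak's floordiv
  have hA : (((h :: t).foldl (fun st p => PySem.Set.discard st (PySem.Int.floordiv (p * i) n))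
        (PySem.Set.ofList (PySem.List.pyRange 0 i 1))).isEmpty = true)
      ↔ ∀ b : Int, 0 ≤ b → b < i → ∃ p ∈ h :: t, PySem.Int.floordiv p s = b := by
    rw [List.isEmpty_iff, List.eq_nil_iff_forall_not_mem]
    constructor
    · intro hemp b hb0 hbi
      by_contra hno
      simp only [not_exists, not_and] at hno
      refine hemp b ((mem_foldl_discard (h :: t) _ _ b).mpr ⟨?_, ?_⟩)
      · exact (PySem.Set.mem_ofList _ _).mpr (PySem.List.mem_pyRange_one.mpr ⟨hb0, hbi⟩)
      · intro p hp
        rw [hbridge p]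
        exact hno p hp
    · intro hcov y hy
      obtain ⟨hy1, hy2⟩ := (mem_foldl_discard (h :: t) _ _ y).mp hy
      have hyr := PySem.List.mem_pyRange_one.mp ((PySem.Set.mem_ofList _ _).mp hy1)
      obtain ⟨p, hp, hgp⟩ := hcov y hyr.1 hyr.2
      exact hy2 p hp (by rw [hbridge p]; exact hgp)
  -- B's three tests, rewritten
  have hgetD0 : PySem.List.pyGetD (h :: t) (0 : Int) 0 = h := by
    rw [PySem.List.pyGetD_eq_getElem _ _ (by norm_num) (by simp)]
    simp
  have hgetDlast : PySem.List.pyGetD (h :: t) (-1) 0 = (h :: t).getLast hnecons := by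
    conv_lhs => rw [← List.dropLast_append_getLast hnecons]
    exact PySem.List.pyGetD_neg_one_append_singleton _ _ _
  have hc1 : (h < s) ↔ PySem.Int.floordiv h s = 0 := by
    rw [PySem.Int.floordiv_eq_iff_of_pos hs]
    constructor
    · intro hlt; exact ⟨by nlinarith [hheadbd.1], by nlinarith⟩
    · rintro ⟨-, h2⟩; nlinarith
  have hc2 : (n - s ≤ (h :: t).getLast hnecons)
      ↔ PySem.Int.floordiv ((h :: t).getLast hnecons) s = i - 1 := by
    rw [PySem.Int.floordiv_eq_iff_of_pos hs]
    constructor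
    · intro hge; exact ⟨by nlinarith, by nlinarith [hlastbd.2]⟩
    · rintro ⟨h2, -⟩; nlinarith
  rw [Bool.eq_iff_iff, hA]
  unfold gapOkB
  rw [hgetD0, hgetDlast]
  simp only [Bool.and_eq_true, decide_eq_true_eq, List.all_eq_true, List.drop_succ_cons,
    List.drop_zero]
  constructor
  · intro hcov
    refine ⟨⟨?_, ?_⟩, ?_⟩
    · -- first peak in block 0
      obtain ⟨p, hp, hp0⟩ := hcov 0 le_rfl hi
      have hle := hmono h p (hhead_le p hp)
      have h0 := (hgbd h (List.mem_cons_self ..)).1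
      exact hc1.mpr (by omega)
    · obtain ⟨p, hp, hpl⟩ := hcov (i - 1) (by omega) (by omega)
      have h1 := hmono p _ (hle_last p hp)
      have h2 := (hgbd _ hlastmem).2
      exact hc2.mpr (by omega)
    · intro pq hpq
      by_contra hgt
      obtain ⟨l1, l2, hdecomp⟩ := zip_mem_decomp (h :: t) pq hpq
      have hmem1 : pq.1 ∈ h :: t := by rw [hdecomp]; simp
      have hmem2 : pq.2 ∈ h :: t := by rw [hdecomp]; simp
      obtain ⟨r, hr, hrc⟩ := hcov (PySem.Int.floordiv pq.1 s + 1)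
        (by have := (hgbd _ hmem1).1; omega)
        (by have := (hgbd _ hmem2).2; omega)
      have hsort' := hsort
      rw [hdecomp] at hsort'
      obtain ⟨-, hp2, hp12⟩ := List.pairwise_append.mp hsort'
      have hq12 := List.pairwise_cons.mp hp2
      have hq2 := List.pairwise_cons.mp hq12.2
      have hrpos : r ∈ l1 ∨ r = pq.1 ∨ r = pq.2 ∨ r ∈ l2 := by
        rw [hdecomp] at hr
        rcases List.mem_append.mp hr with h1 | h2
        · exact Or.inl h1
        · rcases List.mem_cons.mp h2 with rfl | h3
          · exact Or.inr (Or.inl rfl)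
          · rcases List.mem_cons.mp h3 with rfl | h4
            · exact Or.inr (Or.inr (Or.inl rfl))
            · exact Or.inr (Or.inr (Or.inr h4))
      rcases hrpos with h1 | rfl | rfl | h4
      · have : r < pq.1 := hp12 r h1 pq.1 (List.mem_cons_self ..)
        have := hmono r pq.1 (le_of_lt this)
        omega
      · omega
      · omega
      · have : pq.2 < r := hq2.1 r h4
        have := hmono pq.2 r (le_of_lt this)
        omega
  · rintro ⟨⟨hh, hl⟩, hpairs⟩ b hb0 hbi
    have hfh := hc1.mp hh
    have hfl := hc2.mp hl
    exact zip_all_ivt (fun p => PySem.Int.floordiv p s) t h b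
      (List.all_eq_true.mpr (fun pq hpq => decide_eq_true (hpairs pq hpq)))
      (show PySem.Int.floordiv h s ≤ b by omega)
      (show b ≤ PySem.Int.floordiv ((h :: t).getLast hnecons) s by omega)

theorem loops_eq (A : List Int) (hn : 0 < (A.length : Int)) (hne : peaksListA A ≠ [])
    (c : List Int) (hc : ∀ i ∈ c, 0 < i) :
    peaksLoopA (A.length : Int) (peaksListA A) c = peaksLoopB (A.length : Int) (peaksListA A) c := by
  induction c with
  | nil => rfl
  | cons i rest ih =>
    have hi : 0 < i := hc i (List.mem_cons_self ..)
    have hrest : ∀ j ∈ rest, 0 < j := fun j hj => hc j (List.mem_cons_of_mem _ hj)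
    simp only [peaksLoopA, peaksLoopB]
    by_cases hmod : PySem.Int.mod (A.length : Int) i = 0
    · have hdvd : i ∣ (A.length : Int) := (PySem.Int.mod_eq_zero_iff_dvd _ _).mp hmod
      rw [if_pos hmod, if_pos hmod,
        cond_eq (A.length : Int) i (peaksListA A) hi hdvd hn hne (sorted_peaksListA A)
          (fun p hp => by have := mem_peaksListA hp; omega), ih hrest]
    · rw [if_neg hmod, if_neg hmod, ih hrest]

theorem peaks_eq_alt (A : List Int) : peaks A = peaks_alt A := by
  unfold peaks peaks_alt
  rw [listB_eq]
  by_cases hP : peaksListA A = []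
  · rw [hP]; rfl
  · obtain ⟨p, hp⟩ := List.exists_mem_of_ne_nil _ hP
    have hbd := mem_peaksListA hp
    have hn : 0 < (A.length : Int) := by omega
    exact loops_eq A hn hP _ (by
      intro j hj
      rw [PySem.List.mem_pyRange_neg_one] at hj
      omega)

-- ===== VERDICT (by name: the statement is the Claim_ definition above) =====
theorem peaks_spec : Claim_equal_peaks := by
  intro A _
  unfold Spec_peaks
  exact peaks_eq_alt A
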